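-- pv_equiv track=rewrite | github.com/dodaucy/steam-details | src/utils.py | roman_string_to_int_string
-- ===== SOURCE A (Python) =====
-- from typing import Union
--
-- def int_to_roman(num: int) -> str:
--     """
--     Convert integers to roman numbers
--     """
--     ROMAN_DIGITS = [
--         (1000, "M"), (900, "CM"), (500, "D"),
--         (400, "CD"), (100, "C"), (90, "XC"),
--         (50, "L"), (40, "XL"), (10, "X"),
--         (9, "IX"), (5, "V"), (4, "IV"),
--         (1, "I")
--     ]
--
--     roman = ""
--     i = 0
--     while num > 0:
--         for _ in range(num // ROMAN_DIGITS[i][0]):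
--             roman += ROMAN_DIGITS[i][1]
--             num -= ROMAN_DIGITS[i][0]
--         i += 1
--     return roman
--
-- def roman_to_int(roman: str) -> Union[int, None]:
--     """
--     Convert roman numbers to integers or return None if the input is invalid
--
--     Examples:
--     1. II -> 2
--     2. VI -> 6
--     3. XIX -> 19
--     """
--     ROMAN_VALUES = {"I": 1, "V": 5, "X": 10, "L": 50, "C": 100, "D": 500, "M": 1000}
--
--     if not roman:  # Empty string
--         return
--
--     total = 0
--     prev_value = 0
--
--     for char in roman:
--         if char not in ROMAN_VALUES:  # Invalid character
--             return
--
--         current_value = ROMAN_VALUES[char]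
--
--         # If previous value is less, subtract it (for things like IV, IX)
--         if current_value > prev_value:
--             total += current_value - 2 * prev_value
--         else:
--             total += current_value
--
--         prev_value = current_value
--
--     # Validate that the final result
--     if int_to_roman(total) != roman:
--         return
--
--     return total
--
-- def roman_string_to_int_string(string_with_roman: str) -> str:
--     """
--     Convert a string that includes roman numbers to one that only includes integers
--     """
--     name_list = []
--     for word in string_with_roman.split(" "):
--         int_word = roman_to_int(word)
--         if int_word is None:
--             name_list.append(word)
--         else:
--             name_list.append(str(int_word))
--     return " ".join(name_list)
-- ===== SOURCE B (Python) =====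
-- # B: same behaviour, different algorithm — words are recognised against the
-- # canonical roman-numeral grammar  M* hundreds tens units  by longest-prefix
-- # matching on per-digit tables; no character-value arithmetic and no greedy
-- # re-encoding (A's int_to_roman) are used at all.
--
-- _HUNDREDS = ["", "C", "CC", "CCC", "CD", "D", "DC", "DCC", "DCCC", "CM"]
-- _TENS = ["", "X", "XX", "XXX", "XL", "L", "LX", "LXX", "LXXX", "XC"]
-- _UNITS = ["", "I", "II", "III", "IV", "V", "VI", "VII", "VIII", "IX"]
--
--
-- def _match_digit(table, s):
--     # longest table entry that is a prefix of s -> (its digit, the rest of s)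
--     best = 0
--     for d in range(1, 10):
--         p = table[d]
--         if s.startswith(p) and len(p) > len(table[best]):
--             best = d
--     return best, s[len(table[best]):]
--
--
-- def _roman_value(word):
--     m = 0
--     while m < len(word) and word[m] == "M":
--         m += 1
--     rest = word[m:]
--     h, rest = _match_digit(_HUNDREDS, rest)
--     t, rest = _match_digit(_TENS, rest)
--     u, rest = _match_digit(_UNITS, rest)
--     n = 1000 * m + 100 * h + 10 * t + u
--     if rest or n == 0:
--         return None
--     return n
--
--
-- def roman_string_to_int_string(string_with_roman: str) -> str:
--     return " ".join(
--         w if (r := _roman_value(w)) is None else str(r)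
--         for w in string_with_roman.split(" ")
--     )
-- ===== Notes on version B (the rewrite author's own statement) =====
-- stated objective: alternative
-- what changed: Instead of A's character-value scan with subtractive look-behind followed by greedy re-encoding (int_to_roman) to validate, B recognises each word directly against the canonical grammar M* hundreds tens units by longest-prefix matching on three per-digit tables and reads the value off the matched digits; int_to_roman and per-character arithmetic disappear entirely.
import Mathlib
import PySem

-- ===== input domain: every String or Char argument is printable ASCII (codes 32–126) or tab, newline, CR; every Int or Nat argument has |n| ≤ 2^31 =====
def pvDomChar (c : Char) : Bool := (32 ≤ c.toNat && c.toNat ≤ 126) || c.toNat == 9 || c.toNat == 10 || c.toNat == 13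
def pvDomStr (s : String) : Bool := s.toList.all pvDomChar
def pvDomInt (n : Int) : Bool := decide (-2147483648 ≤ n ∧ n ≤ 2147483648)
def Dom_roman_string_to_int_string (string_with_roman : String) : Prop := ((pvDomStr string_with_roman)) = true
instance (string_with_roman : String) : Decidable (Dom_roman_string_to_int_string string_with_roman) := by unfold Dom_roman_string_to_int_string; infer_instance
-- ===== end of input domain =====

-- B recognises each word against the canonical grammar M* hundreds tens units by longest-prefix
-- matching on per-digit tables instead of A's value scan plus greedy re-encoding (alternative).

-- ===== PORT A =====
-- ROMAN_DIGITS (strings kept as List Char; string facts are proved on the list side)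
def romanDigitsA : List (Int × List Char) :=
  [(1000, ['M']), (900, ['C','M']), (500, ['D']),
   (400, ['C','D']), (100, ['C']), (90, ['X','C']),
   (50, ['L']), (40, ['X','L']), (10, ['X']),
   (9, ['I','X']), (5, ['V']), (4, ['I','V']),
   (1, ['I'])]

-- inner 'for _ in range(num // ROMAN_DIGITS[i][0]): roman += …; num -= …'
def introA_inner : Nat → Int → List Char → List Char → Int → (List Char × Int)
  | 0, _, _, roman, num => (roman, num)
  | k+1, v, sym, roman, num => introA_inner k v sym (roman ++ sym) (num - v)

-- outer 'while num > 0' walking the table by index i (the tail list plays the role of i;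
-- on the empty tail with num > 0 Python would raise IndexError — unreachable for every call A makes)
def introA_go : List (Int × List Char) → Int → List Char → List Char
  | [], _, roman => roman
  | (v, sym) :: rest, num, roman =>
    if num > 0 then
      let p := introA_inner (PySem.Int.floordiv num v).toNat v sym roman num
      introA_go rest p.2 p.1
    else roman

def int_to_romanA (num : Int) : List Char := introA_go romanDigitsA num []

def romanValuesA : PySem.Dict Char Int :=
  PySem.Dict.mk [('I',1),('V',5),('X',10),('L',50),('C',100),('D',500),('M',1000)]

-- the 'for char in roman' loop: invalid char → None, else accumulate with the prev-subtraction formula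
def rtiA_go : List Char → Int → Int → Option Int
  | [], total, _ => some total
  | c :: rest, total, prev =>
    match PySem.Dict.get? romanValuesA c with
    | none => none
    | some cur => rtiA_go rest (total + (if cur > prev then cur - 2 * prev else cur)) cur

def roman_to_intA (roman : List Char) : Option Int :=
  if roman = [] then none
  else match rtiA_go roman 0 0 with
    | none => none
    | some total => if int_to_romanA total ≠ roman then none else some total

def roman_string_to_int_string (string_with_roman : String) : String :=
  let name_list := (PySem.Chars.splitOn string_with_roman.toList [' ']).foldl
    (fun acc word =>
      match roman_to_intA word with
      | none => acc ++ [word]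
      | some n => acc ++ [(PySem.Int.toStr n).toList]) []
  String.ofList (PySem.Chars.join [' '] name_list)

-- ===== PORT B =====
def hundredsB : List (List Char) :=
  [[], ['C'], ['C','C'], ['C','C','C'], ['C','D'], ['D'], ['D','C'], ['D','C','C'], ['D','C','C','C'], ['C','M']]
def tensB : List (List Char) :=
  [[], ['X'], ['X','X'], ['X','X','X'], ['X','L'], ['L'], ['L','X'], ['L','X','X'], ['L','X','X','X'], ['X','C']]
def unitsB : List (List Char) :=
  [[], ['I'], ['I','I'], ['I','I','I'], ['I','V'], ['V'], ['V','I'], ['V','I','I'], ['V','I','I','I'], ['I','X']]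

-- '_match_digit': for d in range(1,10) keep the longest table entry that prefixes s.
-- table[d] with d in range(0,10) is always in range for the 10-entry tables, so getD is exact;
-- s[len(p):] with len(p) ≥ 0 is List.drop.
def bestStepB (table : List (List Char)) (s : List Char) (best d : Int) : Int :=
  if (table.getD d.toNat []).isPrefixOf s ∧
     (table.getD d.toNat []).length > (table.getD best.toNat []).length
  then d else best

def matchDigitB (table : List (List Char)) (s : List Char) : Int × List Char :=
  let best := (PySem.List.pyRange 1 10 1).foldl (bestStepB table s) 0
  (best, s.drop (table.getD best.toNat []).length)

-- the leading-run while loop 'while m < len(word) and word[m] == "M": m += 1'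
def countMB : List Char → Nat
  | [] => 0
  | c :: rest => if c = 'M' then countMB rest + 1 else 0

def romanValueB (word : List Char) : Option Int :=
  let m := countMB word
  let p1 := matchDigitB hundredsB (word.drop m)
  let p2 := matchDigitB tensB p1.2
  let p3 := matchDigitB unitsB p2.2
  let n : Int := 1000 * (m : Int) + 100 * p1.1 + 10 * p2.1 + p3.1
  if p3.2 ≠ [] ∨ n = 0 then none else some n

def roman_string_to_int_string_alt (string_with_roman : String) : String :=
  String.ofList (PySem.Chars.join [' ']
    ((PySem.Chars.splitOn string_with_roman.toList [' ']).map (fun word =>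
      match romanValueB word with
      | none => word
      | some n => (PySem.Int.toStr n).toList)))

-- ===== PRECONDITION & SPEC =====
def Spec_roman_string_to_int_string (string_with_roman : String) (out : String) : Prop := out = roman_string_to_int_string_alt string_with_roman
instance (string_with_roman : String) (out : String) : Decidable (Spec_roman_string_to_int_string string_with_roman out) := by unfold Spec_roman_string_to_int_string; infer_instance

-- ===== CLAIM (what is proved, stated in full; the proofs are below) =====
def Claim_equal_roman_string_to_int_string : Prop := ∀ (string_with_roman : String), Dom_roman_string_to_int_string string_with_roman → Spec_roman_string_to_int_string string_with_roman (roman_string_to_int_string string_with_roman)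

-- ===== LEMMAS AND PROOFS =====

-- the canonical numeral below 1000 written from the three digit tables
def lowR (n : Nat) : List Char :=
  hundredsB.getD (n / 100) [] ++ tensB.getD (n / 10 % 10) [] ++ unitsB.getD (n % 10) []

def tailA : List (Int × List Char) :=
  [(900, ['C','M']), (500, ['D']),
   (400, ['C','D']), (100, ['C']), (90, ['X','C']),
   (50, ['L']), (40, ['X','L']), (10, ['X']),
   (9, ['I','X']), (5, ['V']), (4, ['I','V']),
   (1, ['I'])]

lemma romanDigitsA_eq : romanDigitsA = (1000, ['M']) :: tailA := rfl

lemma inner_eq : ∀ (k : Nat) (v : Int) (sym roman : List Char) (num : Int),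
    introA_inner k v sym roman num = (roman ++ (List.replicate k sym).flatten, num - k * v) := by
  intro k
  induction k with
  | zero => intro v sym roman num; simp [introA_inner]
  | succ k ih =>
    intro v sym roman num
    simp only [introA_inner, ih, List.replicate_succ, List.flatten_cons, List.append_assoc,
      Prod.mk.injEq]
    refine ⟨by trivial, ?_⟩
    push_cast; ring

lemma introA_acc : ∀ (digits : List (Int × List Char)) (num : Int) (roman : List Char),
    introA_go digits num roman = roman ++ introA_go digits num [] := by
  intro digits
  induction digits with
  | nil => intro num roman; simp [introA_go]
  | cons p rest ih =>
    intro num roman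
    obtain ⟨v, sym⟩ := p
    by_cases h : num > 0
    · simp only [introA_go, if_pos h, inner_eq]
      rw [ih _ (roman ++ _), ih _ ([] ++ _)]
      simp
    · simp [introA_go, if_neg h]

lemma flatten_repl (m : Nat) : (List.replicate m (['M'] : List Char)).flatten = List.replicate m 'M' := by
  induction m with
  | zero => rfl
  | succ k ih => simp [List.replicate_succ, ih]

-- the tail of the table on any n < 1000 writes exactly lowR n
set_option maxRecDepth 40000 in
lemma lowA_eq : ∀ n : Nat, n < 1000 → introA_go tailA (n : Int) [] = lowR n := by
  decide

lemma intro_char (m n : Nat) (hn : n < 1000) (hpos : 0 < 1000 * m + n) :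
    int_to_romanA (1000 * (m : Int) + (n : Int)) = List.replicate m 'M' ++ lowR n := by
  have hv : (1000 * (m : Int) + (n : Int)) > 0 := by exact_mod_cast hpos
  unfold int_to_romanA
  rw [romanDigitsA_eq]
  simp only [introA_go, if_pos hv, inner_eq]
  have hfd : PySem.Int.floordiv (1000 * (m : Int) + n) 1000 = m := by
    rw [PySem.Int.floordiv_eq_ediv_of_pos (by norm_num)]
    omega
  rw [hfd]
  simp only [Int.toNat_natCast, flatten_repl, List.nil_append]
  have hnum : 1000 * (m : Int) + n - (m : Int) * 1000 = (n : Int) := by ring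
  rw [hnum, introA_acc, lowA_eq n hn]

lemma intro_nonpos (v : Int) (h : v ≤ 0) : int_to_romanA v = [] := by
  have hng : ¬ (v > 0) := by omega
  unfold int_to_romanA
  rw [romanDigitsA_eq]
  simp [introA_go, hng]

lemma rti_shift' : ∀ (cs : List Char) (t a p : Int),
    rtiA_go cs (t + a) p = (rtiA_go cs a p).map (fun x => t + x) := by
  intro cs
  induction cs with
  | nil => intro t a p; simp [rtiA_go]
  | cons c rest ih =>
    intro t a p
    simp only [rtiA_go]
    cases hv : PySem.Dict.get? romanValuesA c with
    | none => rfl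
    | some v =>
      dsimp only
      rw [show t + a + (if v > p then v - 2 * p else v)
            = t + (a + (if v > p then v - 2 * p else v)) from by ring, ih]

lemma rti_shift (cs : List Char) (t p : Int) :
    rtiA_go cs t p = (rtiA_go cs 0 p).map (fun x => t + x) := by
  simpa using rti_shift' cs t 0 p

lemma scanM_aux : ∀ (m : Nat) (s : List Char) (t : Int),
    rtiA_go (List.replicate m 'M' ++ s) t 1000 = rtiA_go s (t + 1000 * m) 1000 := by
  intro m
  induction m with
  | zero => intro s t; simp
  | succ k ih =>
    intro s t
    have hM : PySem.Dict.get? romanValuesA 'M' = some 1000 := by decide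
    simp only [List.replicate_succ, List.cons_append, rtiA_go, hM]
    have h1 : ¬ ((1000 : Int) > 1000) := by omega
    rw [if_neg h1, ih]
    congr 1
    push_cast
    ring

set_option maxRecDepth 40000 in
lemma scanLow0 : ∀ n : Nat, n < 1000 → rtiA_go (lowR n) 0 0 = some (n : Int) := by
  decide

set_option maxRecDepth 40000 in
lemma scanLow1000 : ∀ n : Nat, n < 1000 → rtiA_go (lowR n) 0 1000 = some (n : Int) := by
  decide

set_option maxRecDepth 40000 in
lemma countM_low : ∀ n : Nat, n < 1000 → countMB (lowR n) = 0 := by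
  decide

set_option maxRecDepth 40000 in
lemma lowR_ne_nil : ∀ n : Nat, n < 1000 → n ≠ 0 → lowR n ≠ [] := by
  decide

set_option maxRecDepth 40000 in
lemma parseLow : ∀ n : Nat, n < 1000 →
    (matchDigitB hundredsB (lowR n)).1 = ((n / 100 : Nat) : Int) ∧
    (matchDigitB tensB (matchDigitB hundredsB (lowR n)).2).1 = ((n / 10 % 10 : Nat) : Int) ∧
    (matchDigitB unitsB (matchDigitB tensB (matchDigitB hundredsB (lowR n)).2).2).1 = ((n % 10 : Nat) : Int) ∧
    (matchDigitB unitsB (matchDigitB tensB (matchDigitB hundredsB (lowR n)).2).2).2 = [] := by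
  decide

lemma countM_decomp : ∀ w : List Char, w = List.replicate (countMB w) 'M' ++ w.drop (countMB w) := by
  intro w
  induction w with
  | nil => rfl
  | cons c rest ih =>
    by_cases hc : c = 'M'
    · subst hc
      simp only [countMB, reduceIte]
      exact congrArg _ ih
    · simp [countMB, hc]

lemma countM_repl : ∀ (m : Nat) (s : List Char),
    countMB (List.replicate m 'M' ++ s) = m + countMB s := by
  intro m
  induction m with
  | zero => intro s; simp
  | succ k ih => intro s; simp [List.replicate_succ, countMB, ih]; omega

lemma fold_best (tbl : List (List Char)) (s : List Char) :
    ∀ (l : List Int) (b : Int), (∀ d ∈ l, 0 ≤ d ∧ d < 10) → 0 ≤ b → b < 10 →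
      (tbl.getD b.toNat []).isPrefixOf s = true →
      0 ≤ List.foldl (bestStepB tbl s) b l ∧ List.foldl (bestStepB tbl s) b l < 10 ∧
        (tbl.getD (List.foldl (bestStepB tbl s) b l).toNat []).isPrefixOf s = true := by
  intro l
  induction l with
  | nil => intro b _ h1 h2 h3; exact ⟨h1, h2, h3⟩
  | cons d rest ih =>
    intro b hl h1 h2 h3
    simp only [List.foldl_cons]
    by_cases hc : (tbl.getD d.toNat []).isPrefixOf s ∧
        (tbl.getD d.toNat []).length > (tbl.getD b.toNat []).length
    · rw [show bestStepB tbl s b d = d from if_pos hc]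
      exact ih d (fun x hx => hl x (List.mem_cons_of_mem _ hx))
        (hl d List.mem_cons_self).1 (hl d List.mem_cons_self).2 hc.1
    · rw [show bestStepB tbl s b d = b from if_neg hc]
      exact ih b (fun x hx => hl x (List.mem_cons_of_mem _ hx)) h1 h2 h3

lemma matchDigitB_eq (tbl : List (List Char)) (s : List Char) :
    matchDigitB tbl s =
      (List.foldl (bestStepB tbl s) 0 [1,2,3,4,5,6,7,8,9],
       s.drop ((tbl.getD (List.foldl (bestStepB tbl s) 0 [1,2,3,4,5,6,7,8,9]).toNat []).length)) := by
  unfold matchDigitB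
  rw [show PySem.List.pyRange 1 10 1 = [1,2,3,4,5,6,7,8,9] from by decide]

lemma matchDigitB_spec (tbl : List (List Char)) (s : List Char) (h0 : tbl.getD 0 [] = []) :
    ∃ d : Nat, d < 10 ∧ (matchDigitB tbl s).1 = (d : Int) ∧
      (tbl.getD d []).isPrefixOf s = true ∧
      (matchDigitB tbl s).2 = s.drop (tbl.getD d []).length := by
  obtain ⟨h1, h2, h3⟩ := fold_best tbl s [1,2,3,4,5,6,7,8,9] 0 (by decide)
    (by norm_num) (by norm_num) (by rw [show ((0:Int).toNat) = 0 from rfl, h0]; rfl)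
  refine ⟨(List.foldl (bestStepB tbl s) 0 [1,2,3,4,5,6,7,8,9]).toNat, by omega, ?_, h3, ?_⟩
  · rw [matchDigitB_eq]
    exact (Int.toNat_of_nonneg h1).symm
  · rw [matchDigitB_eq]

lemma prefix_decomp {p s : List Char} (h : p.isPrefixOf s = true) :
    s = p ++ s.drop p.length := by
  obtain ⟨t, rfl⟩ := List.isPrefixOf_iff_prefix.mp h
  simp

lemma getM : PySem.Dict.get? romanValuesA 'M' = some 1000 := by decide

lemma romanValueB_char {w : List Char} {v : Int} (hB : romanValueB w = some v) :
    ∃ (m n : Nat), n < 1000 ∧ w = List.replicate m 'M' ++ lowR n ∧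
      v = 1000 * (m : Int) + (n : Int) ∧ 0 < 1000 * m + n := by
  simp only [romanValueB] at hB
  obtain ⟨d1, hd1, he1, hp1, hr1⟩ := matchDigitB_spec hundredsB (w.drop (countMB w)) rfl
  obtain ⟨d2, hd2, he2, hp2, hr2⟩ :=
    matchDigitB_spec tensB (matchDigitB hundredsB (w.drop (countMB w))).2 rfl
  obtain ⟨d3, hd3, he3, hp3, hr3⟩ :=
    matchDigitB_spec unitsB (matchDigitB tensB (matchDigitB hundredsB (w.drop (countMB w))).2).2 rfl
  rw [ite_eq_iff] at hB
  rcases hB with ⟨_, hB⟩ | ⟨hcond, hB⟩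
  · exact absurd hB (by simp)
  · push_neg at hcond
    obtain ⟨hr0, hnz⟩ := hcond
    have hsplit : w.drop (countMB w) =
        hundredsB.getD d1 [] ++ (tensB.getD d2 [] ++ unitsB.getD d3 []) := by
      have e1 := prefix_decomp hp1
      rw [← hr1] at e1
      have e2 := prefix_decomp hp2
      rw [← hr2] at e2
      have e3 := prefix_decomp hp3
      rw [← hr3] at e3
      rw [e1, e2, e3, hr0, List.append_nil]
    have hlow : lowR (100 * d1 + 10 * d2 + d3) =
        hundredsB.getD d1 [] ++ (tensB.getD d2 [] ++ unitsB.getD d3 []) := by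
      unfold lowR
      rw [show (100 * d1 + 10 * d2 + d3) / 100 = d1 from by omega,
          show (100 * d1 + 10 * d2 + d3) / 10 % 10 = d2 from by omega,
          show (100 * d1 + 10 * d2 + d3) % 10 = d3 from by omega, List.append_assoc]
    refine ⟨countMB w, 100 * d1 + 10 * d2 + d3, by omega, ?_, ?_, ?_⟩
    · calc w = List.replicate (countMB w) 'M' ++ w.drop (countMB w) := countM_decomp w
        _ = _ := by rw [hsplit, hlow]
    · have hv := Option.some.inj hB
      rw [he1, he2, he3] at hv
      push_cast
      omega
    · rw [he1, he2, he3] at hnz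
      have : ¬ (1000 * ((countMB w : Nat) : Int) + 100 * (d1 : Int) + 10 * (d2 : Int) + (d3 : Int) = 0) := hnz
      omega

lemma B_imp_A {w : List Char} {v : Int} (hB : romanValueB w = some v) :
    roman_to_intA w = some v := by
  obtain ⟨m, n, hn, hw, hv, hpos⟩ := romanValueB_char hB
  have hwne : w ≠ [] := by
    rw [hw]
    rcases m with _ | k
    · have hn0 : n ≠ 0 := by omega
      simpa using lowR_ne_nil n hn hn0
    · simp [List.replicate_succ]
  have hscan : rtiA_go w 0 0 = some v := by
    rcases m with _ | k
    · rw [hw]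
      simp only [List.replicate_zero, List.nil_append]
      rw [scanLow0 n hn, hv]
      norm_num
    · rw [hw]
      simp only [List.replicate_succ, List.cons_append, rtiA_go, getM]
      rw [if_pos (by omega : (1000 : Int) > 0)]
      rw [scanM_aux, rti_shift, scanLow1000 n hn, hv]
      simp only [Option.map_some]
      congr 1
      push_cast
      ring
  have hrt : int_to_romanA v = w := by
    rw [hv, intro_char m n hn hpos, ← hw]
  unfold roman_to_intA
  rw [if_neg hwne, hscan]
  simp [hrt]

lemma A_imp_B {w : List Char} {v : Int} (hA : roman_to_intA w = some v) :
    romanValueB w = some v := by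
  unfold roman_to_intA at hA
  by_cases hwne : w = []
  · rw [if_pos hwne] at hA
    exact absurd hA (by simp)
  · rw [if_neg hwne] at hA
    cases hs : rtiA_go w 0 0 with
    | none => rw [hs] at hA; exact absurd hA (by simp)
    | some total =>
      rw [hs] at hA
      dsimp only at hA
      rw [ite_eq_iff] at hA
      rcases hA with ⟨_, hA⟩ | ⟨hrtne, hA⟩
      · exact absurd hA (by simp)
      · push_neg at hrtne
        have hvt : v = total := (Option.some.inj hA).symm
        have htpos : 0 < total := by
          by_contra hle
          push_neg at hle
          rw [intro_nonpos total hle] at hrtne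
          exact hwne hrtne.symm
        set m := total.toNat / 1000 with hm
        set n := total.toNat % 1000 with hn'
        have hn : n < 1000 := Nat.mod_lt _ (by norm_num)
        have htot : total = 1000 * (m : Int) + (n : Int) := by
          rw [hm, hn']
          push_cast
          omega
        have hw : w = List.replicate m 'M' ++ lowR n := by
          rw [← hrtne, htot, intro_char m n hn (by omega)]
        have hcm : countMB w = m := by
          rw [hw, countM_repl, countM_low n hn]
          omega
        have hdrop : w.drop m = lowR n := by
          rw [hw]
          have hdl : List.drop (List.replicate m 'M').length
              (List.replicate m 'M' ++ lowR n) = lowR n := List.drop_left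
          rwa [List.length_replicate] at hdl
        obtain ⟨hq1, hq2, hq3, hq4⟩ := parseLow n hn
        simp only [romanValueB, hcm, hdrop, hq1, hq2, hq3, hq4]
        rw [if_neg]
        · congr 1
          rw [hvt, htot]
          push_cast
          omega
        · push_neg
          refine ⟨rfl, ?_⟩
          rw [htot] at htpos
          push_cast
          omega

lemma rti_eq (word : List Char) : roman_to_intA word = romanValueB word := by
  cases hB : romanValueB word with
  | some v => exact B_imp_A hB
  | none =>
    cases hA : roman_to_intA word with
    | none => rfl
    | some v => rw [A_imp_B hA] at hB; exact absurd hB (by simp)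

-- ===== VERDICT (by name: the statement is the Claim_ definition above) =====
theorem roman_string_to_int_string_spec : Claim_equal_roman_string_to_int_string := by
  intro s _
  unfold Spec_roman_string_to_int_string roman_string_to_int_string roman_string_to_int_string_alt
  have hstep : (fun (acc : List (List Char)) (word : List Char) =>
      match roman_to_intA word with
      | none => acc ++ [word]
      | some n => acc ++ [(PySem.Int.toStr n).toList]) =
      (fun acc word => acc ++ [match romanValueB word with
        | none => word
        | some n => (PySem.Int.toStr n).toList]) := by
    funext acc word
    rw [rti_eq]
    cases romanValueB word <;> rfl
  rw [hstep, PySem.List.foldl_append_singleton_eq_map]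
  simp
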